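-- pv_equiv track=rewrite | github.com/meghavx/cs203-coursework | A3.py | forDataStrings
-- ===== SOURCE A (Python) =====
-- def forDataStrings(st: str, dir: str) :
--     hexstr = ''
--     count = 0
--     for ch in st :
--         count += 1
--         hexstr += hex(ord(ch))[2:].upper()
--         if count % 9 == 0 :
--             hexstr += '-\n'
--     return hexstr
-- ===== SOURCE B (Python) =====
-- def forDataStrings(st: str, dir: str):
--     parts = []
--     for i in range(0, len(st), 9):
--         chunk = st[i:i+9]
--         parts.append(''.join(hex(ord(c))[2:].upper() for c in chunk))
--         if len(chunk) == 9:
--             parts.append('-\n')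
--     return ''.join(parts)
-- ===== Notes on version B (the rewrite author's own statement) =====
-- stated objective: alternative
-- what changed: B iterates over the string in 9-character slices (range(0, len, 9)), hex-encoding each slice with a join and appending the '-\n' separator per full slice, instead of A's single per-character loop with a modulo-9 counter and repeated string concatenation.
import Mathlib
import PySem

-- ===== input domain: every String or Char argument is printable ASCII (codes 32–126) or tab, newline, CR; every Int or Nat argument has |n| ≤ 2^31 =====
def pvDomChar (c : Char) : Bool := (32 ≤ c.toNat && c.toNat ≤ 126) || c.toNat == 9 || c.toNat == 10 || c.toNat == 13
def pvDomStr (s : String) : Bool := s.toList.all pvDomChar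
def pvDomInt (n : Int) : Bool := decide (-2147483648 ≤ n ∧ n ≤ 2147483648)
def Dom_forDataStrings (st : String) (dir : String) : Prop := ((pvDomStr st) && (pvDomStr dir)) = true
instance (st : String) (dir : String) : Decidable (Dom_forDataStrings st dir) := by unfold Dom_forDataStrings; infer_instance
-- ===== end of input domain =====

-- B processes the string in 9-character slices instead of a per-character modulo counter; same output, different decomposition (objective: alternative).

-- shared helper: hex(n)[2:].upper() for a nonnegative code point, as a char list (exact for n ≥ 0)
def hexDigitU (n : Nat) : Char := if n < 10 then Char.ofNat (48 + n) else Char.ofNat (55 + n)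

def hexUpper (n : Nat) : List Char :=
  if _h : n < 16 then [hexDigitU n]
  else hexUpper (n / 16) ++ [hexDigitU (n % 16)]
decreasing_by exact Nat.div_lt_self (by omega) (by omega)

-- ===== PORT A =====
-- the loop body of A (count += 1; hexstr += hex(ord(ch))[2:].upper(); if count % 9 == 0: hexstr += '-\n')
def stepA (acc : List Char × Int) (ch : Char) : List Char × Int :=
  let count := acc.2 + 1
  let hexstr := acc.1 ++ hexUpper ch.toNat
  if PySem.Int.mod count 9 == 0 then (hexstr ++ ['-', '\n'], count)
  else (hexstr, count)

def forDataStrings (st : String) (dir : String) : String :=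
  String.ofList (st.toList.foldl stepA ([], 0)).1

-- ===== PORT B =====
-- loop 'for i in range(0, len(st), 9)' as structural recursion eating one 9-char slice per step
def chunkHex : List Char → List Char
  | [] => []
  | a :: t =>
      let c := (a :: t).take 9
      (c.map (fun ch => hexUpper ch.toNat)).flatten
        ++ (if c.length == 9 then ['-', '\n'] else [])
        ++ chunkHex ((a :: t).drop 9)
termination_by l => l.length
decreasing_by simp

def forDataStrings_alt (st : String) (dir : String) : String :=
  String.ofList (chunkHex st.toList)

-- ===== PRECONDITION & SPEC =====
def Spec_forDataStrings (st : String) (dir : String) (out : String) : Prop := out = forDataStrings_alt st dir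
instance (st : String) (dir : String) (out : String) : Decidable (Spec_forDataStrings st dir out) := by unfold Spec_forDataStrings; infer_instance

-- ===== CLAIM (what is proved, stated in full; the proofs are below) =====
def Claim_equal_forDataStrings : Prop := ∀ (st : String) (dir : String), Dom_forDataStrings st dir → Spec_forDataStrings st dir (forDataStrings st dir)

-- ===== LEMMAS AND PROOFS =====

-- characterisation of A's loop: the remaining output as a function of chars left and current count
def gAux : List Char → Int → List Char
  | [], _ => []
  | a :: t, c =>
      hexUpper a.toNat ++ (if PySem.Int.mod (c + 1) 9 == 0 then ['-', '\n'] else []) ++ gAux t (c + 1)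

theorem pvMod9 (a : Int) : PySem.Int.mod a 9 = a % 9 :=
  PySem.Int.mod_eq_emod_of_pos (by norm_num)

theorem foldA_eq_gAux : ∀ (l : List Char) (acc : List Char) (c : Int),
    (l.foldl stepA (acc, c)).1 = acc ++ gAux l c := by
  intro l
  induction l with
  | nil => intro acc c; simp [gAux]
  | cons a t ih =>
      intro acc c
      rw [List.foldl_cons]
      by_cases h : (9 : Int) ∣ (c + 1)
      · have hs : stepA (acc, c) a = (acc ++ hexUpper a.toNat ++ ['-', '\n'], c + 1) := by
          simp [stepA, h]
        rw [hs, ih]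
        simp [gAux, h, List.append_assoc]
      · have hs : stepA (acc, c) a = (acc ++ hexUpper a.toNat, c + 1) := by
          simp [stepA, h]
        rw [hs, ih]
        simp [gAux, h, List.append_assoc]

theorem gAux_mod : ∀ (l : List Char) (c c' : Int), c % 9 = c' % 9 → gAux l c = gAux l c' := by
  intro l
  induction l with
  | nil => intro c c' _; simp [gAux]
  | cons a t ih =>
      intro c c' h
      have h1 : (c + 1) % 9 = (c' + 1) % 9 := by omega
      simp only [gAux, pvMod9, h1, ih (c + 1) (c' + 1) h1]

theorem gAux_take : ∀ (l : List Char) (k : Nat) (c : Int), 1 ≤ k → k ≤ 9 →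
    (c + (k : Int)) % 9 = 0 →
    gAux l c = ((l.take k).map (fun ch => hexUpper ch.toNat)).flatten
      ++ (if k ≤ l.length then ['-', '\n'] ++ gAux (l.drop k) 0 else []) := by
  intro l
  induction l with
  | nil =>
      intro k c hk _ _
      simp [gAux]
      omega
  | cons a t ih =>
      intro k c hk hk9 hc
      match k, hk with
      | 1, _ =>
          have h1 : (c + 1) % 9 = 0 := by omega
          have : gAux t (c + 1) = gAux t 0 := gAux_mod t (c + 1) 0 (by omega)
          simp [gAux, pvMod9, h1, this]
      | (m + 2), _ =>
          have hne : (c + 1) % 9 ≠ 0 := by omega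
          have := ih (m + 1) (c + 1) (by omega) (by omega) (by push_cast; omega)
          simp only [gAux, pvMod9, this, List.take_succ_cons, List.drop_succ_cons,
            List.map_cons, List.flatten_cons, List.length_cons]
          have hiff : m + 2 ≤ t.length + 1 ↔ m + 1 ≤ t.length := by omega
          by_cases hlen : m + 1 ≤ t.length
          · simp [hne, hlen, hiff.mpr hlen, List.append_assoc]
          · simp [hne, hlen]

theorem gAux_eq_chunkHex : ∀ (n : Nat) (l : List Char), l.length ≤ n → gAux l 0 = chunkHex l := by
  intro n
  induction n with
  | zero =>
      intro l hl
      have : l = [] := List.eq_nil_of_length_eq_zero (by omega)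
      rw [this, chunkHex]
      simp [gAux]
  | succ n ih =>
      intro l hl
      match l with
      | [] => rw [chunkHex]; simp [gAux]
      | a :: t =>
          rw [gAux_take (a :: t) 9 0 (by omega) (by omega) (by decide)]
          rw [chunkHex]
          by_cases h : 8 ≤ t.length
          · have htake : ((a :: t).take 9).length = 9 := by
              simp [List.length_cons]; omega
            have hdrop : (List.drop 8 t).length ≤ n := by
              simp [List.length_cons] at hl ⊢; omega
            simp [h, ih (List.drop 8 t) hdrop]
          · have hdrop : List.drop 9 (a :: t) = [] := List.drop_eq_nil_of_le (by simp; omega)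
            have htake : ((a :: t).take 9).length ≠ 9 := by
              simp [List.length_cons]; omega
            have h9 : ¬ 9 ≤ (a :: t).length := by simp [List.length_cons]; omega
            rw [hdrop, chunkHex]
            simp [h]

-- ===== VERDICT (by name: the statement is the Claim_ definition above) =====
theorem forDataStrings_spec : Claim_equal_forDataStrings := by
  intro st dir _
  show forDataStrings st dir = forDataStrings_alt st dir
  unfold forDataStrings forDataStrings_alt
  rw [foldA_eq_gAux st.toList [] 0, List.nil_append,
    gAux_eq_chunkHex st.toList.length st.toList le_rfl]
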